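-- pv_equiv track=rewrite | github.com/avinaykalyanreddy/TUF | contest/3848. Check Digitorial Permutation.py | isDigitorialPermutation
-- ===== SOURCE A (Python) =====
-- def isDigitorialPermutation(n: int) -> bool:
--     def factorial(n):
--         res = 1
--         for i in range(n, 0, -1):
--             res = res * i
--
--         return res
--
--     dic1 = {}
--     res = 0
--     while n:
--
--         x = n % 10
--
--         dic1[x] = dic1.get(x, 0) + 1
--         if n != 0:
--             res = res + factorial(x)
--         else:
--
--             res = res + 1
--
--         n = n // 10
--
--     dic2 = {}
--
--     while res:
--         x = res % 10
--
--         dic2[x] = dic2.get(x, 0) + 1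
--
--         res = res // 10
--
--     return (dic2 == dic1)
-- ===== SOURCE B (Python) =====
-- PRIMES = [2, 3, 5, 7, 11, 13, 17, 19, 23, 29]
-- FACT = [1, 1, 2, 6, 24, 120, 720, 5040, 40320, 362880]
--
--
-- def isDigitorialPermutation(n: int) -> bool:
--     # Multiplicative fingerprint: encode n's digit multiset as a product of
--     # distinct primes (unique factorization makes the encoding faithful),
--     # then consume the digits of the factorial sum by exact division,
--     # bailing out early on the first digit n does not contain.
--     sig = 1
--     res = 0
--     for c in str(n):
--         d = ord(c) - 48
--         sig *= PRIMES[d]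
--         res += FACT[d]
--     while res:
--         p = PRIMES[res % 10]
--         if sig % p:
--             return False
--         sig //= p
--         res //= 10
--     return sig == 1
-- ===== Notes on version B (the rewrite author's own statement) =====
-- stated objective: alternative
-- what changed: Drops A's two frequency dicts and per-digit factorial loops: B encodes n's digit multiset as a product of distinct primes (faithful by unique factorization) in one pass over str(n) that also sums table-lookup factorials, then checks the permutation by exact division of the fingerprint by the prime of each digit of the sum, with an early exit on the first missing digit.
-- intended difference: On n = 0 A returns True because its while-loop never runs and compares two empty dicts, while B returns False, the intended answer: the factorial of zero's lone digit is one, and the digit string of one is not a permutation of the digit string of zero. — e.g. on isDigitorialPermutation(0): A returns true, B returns false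
import Mathlib
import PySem

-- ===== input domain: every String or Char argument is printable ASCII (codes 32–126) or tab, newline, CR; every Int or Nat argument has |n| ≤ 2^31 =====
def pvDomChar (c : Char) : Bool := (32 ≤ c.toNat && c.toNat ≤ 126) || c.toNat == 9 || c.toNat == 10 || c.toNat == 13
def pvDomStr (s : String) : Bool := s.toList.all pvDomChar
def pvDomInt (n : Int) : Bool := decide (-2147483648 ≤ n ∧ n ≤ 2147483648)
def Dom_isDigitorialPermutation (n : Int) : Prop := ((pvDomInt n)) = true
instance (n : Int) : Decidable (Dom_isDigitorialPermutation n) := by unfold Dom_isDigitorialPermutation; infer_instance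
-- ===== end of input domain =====

-- B replaces A's two frequency dicts and per-digit factorial loops by a multiplicative prime
-- fingerprint of n's digit multiset (one pass over str(n), also summing table factorials),
-- consumed by exact division over the digits of the sum with an early exit (objective: alternative).

-- ===== PORT A =====

-- inner helper 'factorial(n)': res = 1; for i in range(n, 0, -1): res = res * i
def pvFactA (n : Int) : Int :=
  (PySem.List.pyRange n 0 (-1)).foldl (fun res i => res * i) 1

-- 'while n:' loop building dic1 and res; fuel makes the recursion total (Python diverges for n < 0)
def pvLoop1 : Nat → Int → PySem.Dict Int Int → Int → PySem.Dict Int Int × Int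
  | 0, _, dic, res => (dic, res)
  | fuel + 1, n, dic, res =>
      if n = 0 then (dic, res)
      else
        let x := PySem.Int.mod n 10
        let dic := dic.modify x 0 (· + 1)
        let res := if n ≠ 0 then res + pvFactA x else res + 1
        pvLoop1 fuel (PySem.Int.floordiv n 10) dic res

-- 'while res:' loop building dic2
def pvLoop2 : Nat → Int → PySem.Dict Int Int → PySem.Dict Int Int
  | 0, _, dic => dic
  | fuel + 1, res, dic =>
      if res = 0 then dic
      else pvLoop2 fuel (PySem.Int.floordiv res 10)
            (dic.modify (PySem.Int.mod res 10) 0 (· + 1))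

-- Python's 'dic2 == dic1' (dict equality ignores insertion order: mutual lookup agreement)
def pvDictEq (d1 d2 : PySem.Dict Int Int) : Bool :=
  d1.items.all (fun p => d2.get? p.1 == some p.2) &&
    d2.items.all (fun p => d1.get? p.1 == some p.2)

def isDigitorialPermutation (n : Int) : Bool :=
  let r1 := pvLoop1 (n.toNat + 1) n PySem.Dict.empty 0
  let dic1 := r1.1
  let res := r1.2
  let dic2 := pvLoop2 (res.toNat + 1) res PySem.Dict.empty
  pvDictEq dic2 dic1

-- ===== PORT B =====

-- PRIMES = [2, 3, 5, 7, 11, 13, 17, 19, 23, 29]; FACT = [1, 1, 2, 6, 24, ...]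
def pvPrimes : List Int := [2, 3, 5, 7, 11, 13, 17, 19, 23, 29]
def pvFactTable : List Int := [1, 1, 2, 6, 24, 120, 720, 5040, 40320, 362880]

-- 'for c in str(n): d = ord(c) - 48; sig *= PRIMES[d]; res += FACT[d]'
-- (.getD 0 only totalises pyGet?; on the digit chars of str(n) for n ≥ 0 it is always some)
def pvSigRes (s : List Char) : Int × Int :=
  s.foldl (fun acc c =>
    ((acc.1 * (PySem.List.pyGet? pvPrimes ((c.toNat : Int) - 48)).getD 0),
     (acc.2 + (PySem.List.pyGet? pvFactTable ((c.toNat : Int) - 48)).getD 0))) (1, 0)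

-- 'while res:' division loop with early 'return False'; fuel-totalised
def pvDivLoop : Nat → Int → Int → Bool
  | 0, _, sig => sig == 1
  | fuel + 1, res, sig =>
      if res = 0 then sig == 1
      else
        let p := (PySem.List.pyGet? pvPrimes (PySem.Int.mod res 10)).getD 0
        if PySem.Int.mod sig p ≠ 0 then false
        else pvDivLoop fuel (PySem.Int.floordiv res 10) (PySem.Int.floordiv sig p)

def isDigitorialPermutation_alt (n : Int) : Bool :=
  let sr := pvSigRes (PySem.Int.toChars n)
  pvDivLoop (sr.2.toNat + 1) sr.2 sr.1

-- ===== PRECONDITION & SPEC =====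

-- A's 'while n:' with 'n //= 10' never terminates for n < 0 (n gets stuck at -1): Pre_ excludes negatives.
def Pre_isDigitorialPermutation (n : Int) : Prop := 0 ≤ n
instance (n : Int) : Decidable (Pre_isDigitorialPermutation n) := by
  unfold Pre_isDigitorialPermutation; infer_instance

def pvWitness_isDigitorialPermutation : Int := (145)

-- On n = 0 A returns True (its loop never runs, comparing two empty dicts) while B returns False,
-- the intended answer: the factorial of zero's lone digit is one, and the digit string of one
-- is not a permutation of the digit string of zero.
def D_isDigitorialPermutation (n : Int) : Prop := n = 0
instance (n : Int) : Decidable (D_isDigitorialPermutation n) := by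
  unfold D_isDigitorialPermutation; infer_instance

def Spec_isDigitorialPermutation (n : Int) (out : Bool) : Prop :=
  ¬ D_isDigitorialPermutation n → out = isDigitorialPermutation_alt n
instance (n : Int) (out : Bool) : Decidable (Spec_isDigitorialPermutation n out) := by
  unfold Spec_isDigitorialPermutation; infer_instance

def pvDiffWitness_isDigitorialPermutation : Int := (0)
def pvDiffWitnessOut_isDigitorialPermutation : Bool × Bool := (true, false)

-- ===== CLAIM (what is proved, stated in full; the proofs are below) =====
def Claim_unchanged_isDigitorialPermutation : Prop := ∀ (n : Int), Dom_isDigitorialPermutation n → Pre_isDigitorialPermutation n → Spec_isDigitorialPermutation n (isDigitorialPermutation n)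
def Claim_changed_isDigitorialPermutation : Prop := Dom_isDigitorialPermutation (pvDiffWitness_isDigitorialPermutation) ∧ Pre_isDigitorialPermutation (pvDiffWitness_isDigitorialPermutation) ∧ D_isDigitorialPermutation (pvDiffWitness_isDigitorialPermutation) ∧ isDigitorialPermutation (pvDiffWitness_isDigitorialPermutation) = pvDiffWitnessOut_isDigitorialPermutation.1 ∧ isDigitorialPermutation_alt (pvDiffWitness_isDigitorialPermutation) = pvDiffWitnessOut_isDigitorialPermutation.2 ∧ pvDiffWitnessOut_isDigitorialPermutation.1 ≠ pvDiffWitnessOut_isDigitorialPermutation.2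
def Claim_exact_isDigitorialPermutation : Prop := ∀ (n : Int), Dom_isDigitorialPermutation n → Pre_isDigitorialPermutation n → D_isDigitorialPermutation n → isDigitorialPermutation n ≠ isDigitorialPermutation_alt n

-- ===== LEMMAS AND PROOFS =====

-- A's loop 1 computes the digit counter and the digit-factorial sum (digits via Nat.digits 10).
lemma pvLoop1_spec (m : Nat) : ∀ (fuel : Nat), m < fuel → ∀ (d : PySem.Dict Int Int) (r : Int),
    pvLoop1 fuel (m : Int) d r =
      ((Nat.digits 10 m).foldl (fun (d : PySem.Dict Int Int) (x : Nat) => d.modify (x : Int) 0 (· + 1)) d,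
       r + ((Nat.digits 10 m).map (fun x : Nat => pvFactA (x : Int))).sum) := by
  induction m using Nat.strong_induction_on with
  | _ m ih =>
    intro fuel hf d r
    match fuel, hf with
    | fuel + 1, hf =>
      by_cases hm : m = 0
      · subst hm; simp [pvLoop1]
      · have hm1 : 1 ≤ m := Nat.one_le_iff_ne_zero.mpr hm
        have hne : (m : Int) ≠ 0 := by exact_mod_cast hm
        have hmod : PySem.Int.mod (m : Int) 10 = ((m % 10 : Nat) : Int) :=
          by exact_mod_cast PySem.Int.mod_natCast m 10
        have hdiv : PySem.Int.floordiv (m : Int) 10 = ((m / 10 : Nat) : Int) :=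
          by exact_mod_cast PySem.Int.floordiv_natCast m 10
        have hlt : m / 10 < fuel := by
          have := Nat.div_lt_self hm1 (by norm_num : 1 < 10)
          omega
        conv_lhs => rw [pvLoop1]
        rw [if_neg hne]
        simp only [if_pos hne, hmod, hdiv]
        rw [Nat.digits_def' (by norm_num : 1 < 10) (show 0 < m by omega)]
        rw [ih (m / 10) (Nat.div_lt_self hm1 (by norm_num)) fuel hlt]
        simp only [List.foldl_cons, List.map_cons, List.sum_cons]
        rw [Prod.mk.injEq]
        exact ⟨rfl, by ring⟩

-- A's loop 2 builds the digit counter of res the same way.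
lemma pvLoop2_spec (m : Nat) : ∀ (fuel : Nat), m < fuel → ∀ (d : PySem.Dict Int Int),
    pvLoop2 fuel (m : Int) d =
      (Nat.digits 10 m).foldl (fun (d : PySem.Dict Int Int) (x : Nat) => d.modify (x : Int) 0 (· + 1)) d := by
  induction m using Nat.strong_induction_on with
  | _ m ih =>
    intro fuel hf d
    match fuel, hf with
    | fuel + 1, hf =>
      by_cases hm : m = 0
      · subst hm; simp [pvLoop2]
      · have hm1 : 1 ≤ m := Nat.one_le_iff_ne_zero.mpr hm
        have hne : (m : Int) ≠ 0 := by exact_mod_cast hm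
        have hmod : PySem.Int.mod (m : Int) 10 = ((m % 10 : Nat) : Int) :=
          by exact_mod_cast PySem.Int.mod_natCast m 10
        have hdiv : PySem.Int.floordiv (m : Int) 10 = ((m / 10 : Nat) : Int) :=
          by exact_mod_cast PySem.Int.floordiv_natCast m 10
        have hlt : m / 10 < fuel := by
          have := Nat.div_lt_self hm1 (by norm_num : 1 < 10)
          omega
        conv_lhs => rw [pvLoop2]
        rw [if_neg hne]
        simp only [hmod, hdiv]
        rw [Nat.digits_def' (by norm_num : 1 < 10) (show 0 < m by omega)]
        rw [ih (m / 10) (Nat.div_lt_self hm1 (by norm_num)) fuel hlt]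
        simp only [List.foldl_cons]

lemma counter_of_foldl (L : List Nat) :
    L.foldl (fun (d : PySem.Dict Int Int) (x : Nat) => d.modify (x : Int) 0 (· + 1)) PySem.Dict.empty =
      PySem.Dict.counter (List.map Int.ofNat L) := by
  rw [PySem.Dict.counter_eq_foldl, List.foldl_map]; rfl

-- str(m) for m ≥ 1 is the decimal digit characters, most significant first.
lemma toDigitsCore_eq (n : Nat) : ∀ (fuel : Nat), n < fuel → 0 < n → ∀ (ds : List Char),
    Nat.toDigitsCore 10 fuel n ds =
      ((Nat.digits 10 n).map Nat.digitChar).reverse ++ ds := by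
  induction n using Nat.strong_induction_on with
  | _ n ih =>
    intro fuel hf hn ds
    match fuel, hf with
    | fuel + 1, hf =>
      rw [Nat.toDigitsCore]
      rw [Nat.digits_def' (by norm_num : 1 < 10) hn]
      by_cases h : n / 10 = 0
      · rw [if_pos h, h]
        simp
      · rw [if_neg h]
        rw [ih (n / 10) (Nat.div_lt_self hn (by norm_num)) fuel
          (by have := Nat.div_lt_self hn (by norm_num : 1 < 10); omega)
          (Nat.pos_of_ne_zero h)]
        simp

lemma toChars_natCast (m : Nat) (hm : 1 ≤ m) :
    PySem.Int.toChars (m : Int) = ((Nat.digits 10 m).map Nat.digitChar).reverse := by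
  unfold PySem.Int.toChars
  rw [if_neg (by omega)]
  simp only [Int.toNat_natCast]
  rw [Nat.toDigits, toDigitsCore_eq m (m + 1) (by omega) (by omega) []]
  simp

lemma get?_counter (xs : List Int) (k : Int) :
    (PySem.Dict.counter xs).get? k = if k ∈ xs then some ((xs.count k : Int)) else none := by
  by_cases h : k ∈ xs
  · rw [if_pos h]
    have hc : (PySem.Dict.counter xs).contains k = true := by
      rw [PySem.Dict.contains_counter]
      exact List.elem_eq_true_of_mem h
    rw [PySem.Dict.contains_eq_isSome_get?] at hc
    obtain ⟨v, hv⟩ := Option.isSome_iff_exists.mp hc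
    have := PySem.Dict.getD_eq_get?_getD (PySem.Dict.counter xs) k 0
    rw [PySem.Dict.getD_counter, hv] at this
    simp at this
    rw [hv, this]
  · rw [if_neg h]
    rw [PySem.Dict.get?_eq_none_iff_contains, PySem.Dict.contains_counter]
    simpa using h

-- Python's dict equality of two Counters is multiset equality of the counted lists.
lemma pvDictEq_counter_iff (xs ys : List Int) :
    pvDictEq (PySem.Dict.counter xs) (PySem.Dict.counter ys) = true ↔ xs.Perm ys := by
  rw [List.perm_iff_count]
  unfold pvDictEq
  rw [Bool.and_eq_true, List.all_eq_true, List.all_eq_true]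
  constructor
  · rintro ⟨h1, h2⟩ a
    by_cases hx : a ∈ xs
    · have hmem : (a, (xs.count a : Int)) ∈ (PySem.Dict.counter xs).items := by
        rw [PySem.Dict.items_counter]
        exact List.mem_map.mpr ⟨a, (PySem.Set.mem_ofList xs a).mpr hx, rfl⟩
      have := h1 _ hmem
      rw [beq_iff_eq, get?_counter] at this
      by_cases hy : a ∈ ys
      · rw [if_pos hy] at this
        injection this with h'
        simp only at h'
        exact_mod_cast h'.symm
      · rw [if_neg hy] at this
        exact absurd this (by simp)
    · by_cases hy : a ∈ ys
      · have hmem : (a, (ys.count a : Int)) ∈ (PySem.Dict.counter ys).items := by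
          rw [PySem.Dict.items_counter]
          exact List.mem_map.mpr ⟨a, (PySem.Set.mem_ofList ys a).mpr hy, rfl⟩
        have := h2 _ hmem
        rw [beq_iff_eq, get?_counter, if_neg hx] at this
        exact absurd this (by simp)
      · rw [List.count_eq_zero_of_not_mem hx, List.count_eq_zero_of_not_mem hy]
  · intro h
    have hmemiff : ∀ a, a ∈ xs ↔ a ∈ ys := by
      intro a
      rw [← List.count_pos_iff, ← List.count_pos_iff, h a]
    constructor
    · intro p hp
      rw [PySem.Dict.items_counter] at hp
      obtain ⟨a, ha, rfl⟩ := List.mem_map.mp hp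
      rw [PySem.Set.mem_ofList] at ha
      rw [beq_iff_eq, get?_counter, if_pos ((hmemiff a).mp ha), h a]
    · intro p hp
      rw [PySem.Dict.items_counter] at hp
      obtain ⟨a, ha, rfl⟩ := List.mem_map.mp hp
      rw [PySem.Set.mem_ofList] at ha
      rw [beq_iff_eq, get?_counter, if_pos ((hmemiff a).mpr ha), h a]

lemma perm_map_ofNat (A B : List Nat) :
    (List.map Int.ofNat A).Perm (List.map Int.ofNat B) ↔ A.Perm B := by
  constructor
  · intro h
    have h2 := h.map Int.toNat
    rw [List.map_map, List.map_map] at h2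
    simpa [Function.comp_def] using h2
  · exact fun h => h.map _

-- the prime assigned to digit x
def pvPrimeOf (x : Nat) : Nat := [2, 3, 5, 7, 11, 13, 17, 19, 23, 29].getD x 0

-- the fingerprint of a digit list
def pvP (L : List Nat) : Nat := (L.map pvPrimeOf).prod

lemma primes_get_digit (x : Nat) (hx : x < 10) :
    (PySem.List.pyGet? pvPrimes (x : Int)).getD 0 = (pvPrimeOf x : Int) := by
  interval_cases x <;> decide

lemma primes_get_digitChar (x : Nat) (hx : x < 10) :
    (PySem.List.pyGet? pvPrimes (((Nat.digitChar x).toNat : Int) - 48)).getD 0 = (pvPrimeOf x : Int) := by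
  interval_cases x <;> decide

lemma fact_get_digitChar (x : Nat) (hx : x < 10) :
    (PySem.List.pyGet? pvFactTable (((Nat.digitChar x).toNat : Int) - 48)).getD 0 = pvFactA (x : Int) := by
  interval_cases x <;> decide

lemma factA_digit_pos (x : Nat) (hx : x < 10) : 1 ≤ pvFactA (x : Int) := by
  interval_cases x <;> decide

lemma primeOf_prime (x : Nat) (hx : x < 10) : Nat.Prime (pvPrimeOf x) := by
  interval_cases x <;> norm_num [pvPrimeOf]

lemma primeOf_dvd_iff (x y : Nat) (hx : x < 10) (hy : y < 10) :
    pvPrimeOf x ∣ pvPrimeOf y ↔ x = y := by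
  interval_cases x <;> interval_cases y <;> decide

lemma pvP_cons (a : Nat) (t : List Nat) : pvP (a :: t) = pvPrimeOf a * pvP t := rfl

lemma pvP_pos (L : List Nat) (hL : ∀ x ∈ L, x < 10) : 0 < pvP L := by
  induction L with
  | nil => decide
  | cons a t ih =>
    have ha : a < 10 := hL a List.mem_cons_self
    have h2 : 2 ≤ pvPrimeOf a := (primeOf_prime a ha).two_le
    have ht := ih (fun x hx => hL x (List.mem_cons_of_mem _ hx))
    rw [pvP_cons]
    exact Nat.mul_pos (by omega) ht

lemma pvP_eq_one_iff (L : List Nat) (hL : ∀ x ∈ L, x < 10) : pvP L = 1 ↔ L = [] := by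
  cases L with
  | nil => simp [pvP]
  | cons a t =>
    have ha : a < 10 := hL a List.mem_cons_self
    have h2 : 2 ≤ pvPrimeOf a := (primeOf_prime a ha).two_le
    have ht : 0 < pvP t := pvP_pos t (fun x hx => hL x (List.mem_cons_of_mem _ hx))
    have hle : pvPrimeOf a ≤ pvPrimeOf a * pvP t := Nat.le_mul_of_pos_right _ ht
    rw [pvP_cons]
    constructor
    · intro h; omega
    · intro h; exact absurd h (by simp)

lemma primeOf_dvd_pvP_iff (d : Nat) (hd : d < 10) (L : List Nat) (hL : ∀ x ∈ L, x < 10) :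
    pvPrimeOf d ∣ pvP L ↔ d ∈ L := by
  rw [pvP, (primeOf_prime d hd).prime.dvd_prod_iff]
  constructor
  · rintro ⟨a, ha, hdvd⟩
    obtain ⟨x, hx, rfl⟩ := List.mem_map.mp ha
    rwa [(primeOf_dvd_iff d x hd (hL x hx)).mp hdvd]
  · intro h
    exact ⟨pvPrimeOf d, List.mem_map.mpr ⟨d, h, rfl⟩, dvd_rfl⟩

lemma pvP_erase (d : Nat) (L : List Nat) (h : d ∈ L) :
    pvP L = pvPrimeOf d * pvP (L.erase d) := by
  have hperm : L.Perm (d :: L.erase d) := List.perm_cons_erase h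
  have := hperm.map pvPrimeOf
  rw [pvP, this.prod_eq, List.map_cons, List.prod_cons]
  rfl

-- B's first pass: the fingerprint and the digit-factorial sum of str(m).
lemma pvSigRes_fold (l : List Char) (a b : Int) :
    l.foldl (fun acc c =>
      ((acc.1 * (PySem.List.pyGet? pvPrimes ((c.toNat : Int) - 48)).getD 0),
       (acc.2 + (PySem.List.pyGet? pvFactTable ((c.toNat : Int) - 48)).getD 0))) (a, b) =
      (a * (l.map (fun c => (PySem.List.pyGet? pvPrimes ((c.toNat : Int) - 48)).getD 0)).prod,
       b + (l.map (fun c => (PySem.List.pyGet? pvFactTable ((c.toNat : Int) - 48)).getD 0)).sum) := by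
  induction l generalizing a b with
  | nil => simp
  | cons c t ih =>
    simp only [List.foldl_cons, List.map_cons, List.prod_cons, List.sum_cons, ih]
    rw [Prod.mk.injEq]
    constructor <;> ring

lemma pvSigRes_spec (Dg : List Nat) (hd : ∀ x ∈ Dg, x < 10) :
    pvSigRes ((Dg.map Nat.digitChar).reverse) =
      ((pvP Dg : Int), ((Dg.map (fun x : Nat => pvFactA (x : Int))).sum)) := by
  unfold pvSigRes
  rw [pvSigRes_fold]
  rw [Prod.mk.injEq]
  constructor
  · rw [one_mul, List.map_reverse, List.prod_reverse, List.map_map]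
    rw [show (Dg.map ((fun c => (PySem.List.pyGet? pvPrimes ((c.toNat : Int) - 48)).getD 0) ∘ Nat.digitChar)) =
        Dg.map (fun x => (pvPrimeOf x : Int)) from
      List.map_congr_left (fun x hx => primes_get_digitChar x (hd x hx))]
    rw [pvP]
    push_cast
    rw [List.map_map]
    rfl
  · rw [zero_add, List.map_reverse, List.sum_reverse, List.map_map]
    exact congrArg _ (List.map_congr_left (fun x hx => fact_get_digitChar x (hd x hx)))

-- B's division loop decides whether the digits of res form a permutation of L.
lemma pvDivLoop_spec (r : Nat) : ∀ (fuel : Nat), r < fuel → ∀ (L : List Nat), (∀ x ∈ L, x < 10) →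
    pvDivLoop fuel (r : Int) ((pvP L : Nat) : Int) = decide ((Nat.digits 10 r).Perm L) := by
  induction r using Nat.strong_induction_on with
  | _ r ih =>
    intro fuel hf L hL
    match fuel, hf with
    | fuel + 1, hf =>
      by_cases hr : r = 0
      · subst hr
        simp only [pvDivLoop, Nat.cast_zero, if_true, Nat.digits_zero]
        rw [Bool.eq_iff_iff, beq_iff_eq, decide_eq_true_iff]
        rw [show ((pvP L : Nat) : Int) = 1 ↔ pvP L = 1 by exact_mod_cast Iff.rfl]
        rw [pvP_eq_one_iff L hL]
        exact ⟨fun h => h ▸ List.Perm.refl _, fun h => (List.perm_nil.mp h.symm)⟩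
      · have hr1 : 0 < r := Nat.pos_of_ne_zero hr
        have hne : (r : Int) ≠ 0 := by exact_mod_cast hr
        set d := r % 10 with hdd
        have hd : d < 10 := Nat.mod_lt _ (by norm_num)
        have hmod : PySem.Int.mod (r : Int) 10 = ((d : Nat) : Int) :=
          by exact_mod_cast PySem.Int.mod_natCast r 10
        have hdiv : PySem.Int.floordiv (r : Int) 10 = ((r / 10 : Nat) : Int) :=
          by exact_mod_cast PySem.Int.floordiv_natCast r 10
        conv_lhs => rw [pvDivLoop]
        rw [if_neg hne]
        simp only [hmod, hdiv, primes_get_digit d hd]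
        have hsigmod : PySem.Int.mod ((pvP L : Nat) : Int) ((pvPrimeOf d : Nat) : Int) =
            (((pvP L % pvPrimeOf d : Nat) : Nat) : Int) :=
          by exact_mod_cast PySem.Int.mod_natCast (pvP L) (pvPrimeOf d)
        rw [hsigmod]
        rw [Nat.digits_def' (by norm_num : 1 < 10) hr1, ← hdd]
        by_cases hmem : d ∈ L
        · have hdvd : pvPrimeOf d ∣ pvP L := (primeOf_dvd_pvP_iff d hd L hL).mpr hmem
          have hmz : pvP L % pvPrimeOf d = 0 := Nat.dvd_iff_mod_eq_zero.mp hdvd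
          rw [if_neg (by simp only [ne_eq, not_not]; exact_mod_cast hmz)]
          have hsigdiv : PySem.Int.floordiv ((pvP L : Nat) : Int) ((pvPrimeOf d : Nat) : Int) =
              ((pvP L / pvPrimeOf d : Nat) : Int) :=
            by exact_mod_cast PySem.Int.floordiv_natCast (pvP L) (pvPrimeOf d)
          rw [hsigdiv]
          have herase : pvP L / pvPrimeOf d = pvP (L.erase d) := by
            rw [pvP_erase d L hmem]
            exact Nat.mul_div_cancel_left _ (primeOf_prime d hd).pos
          rw [herase]
          rw [ih (r / 10) (Nat.div_lt_self hr1 (by norm_num)) fuel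
            (by have := Nat.div_lt_self hr1 (by norm_num : 1 < 10); omega)
            (L.erase d) (fun x hx => hL x (List.mem_of_mem_erase hx))]
          rw [Bool.eq_iff_iff, decide_eq_true_iff, decide_eq_true_iff]
          rw [List.cons_perm_iff_perm_erase]
          exact ⟨fun h => ⟨hmem, h⟩, fun h => h.2⟩
        · have hndvd : ¬ pvPrimeOf d ∣ pvP L := fun h => hmem ((primeOf_dvd_pvP_iff d hd L hL).mp h)
          rw [if_pos (by
            simp only [ne_eq]
            intro h
            exact hndvd (Nat.dvd_of_mod_eq_zero (by exact_mod_cast h)))]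
          rw [Bool.eq_iff_iff, decide_eq_true_iff]
          apply iff_of_false (by simp)
          intro hperm
          exact hmem (hperm.mem_iff.mp List.mem_cons_self)

lemma main_eq (m : Nat) (hm : 1 ≤ m) :
    isDigitorialPermutation (m : Int) = isDigitorialPermutation_alt (m : Int) := by
  have hdig : ∀ x ∈ Nat.digits 10 m, x < 10 :=
    fun x hx => Nat.digits_lt_base (by norm_num) hx
  set Dg := Nat.digits 10 m with hDg
  have hS1 : 1 ≤ ((Dg.map (fun x : Nat => pvFactA (x : Int))).sum) := by
    have hne : Dg ≠ [] := by
      rw [hDg]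
      simpa using Nat.digits_ne_nil_iff_ne_zero.mpr (by omega)
    obtain ⟨a, t, hat⟩ := List.exists_cons_of_ne_nil hne
    have hmem : ∀ x ∈ Dg, 1 ≤ pvFactA (x : Int) := fun x hx => factA_digit_pos x (hdig x hx)
    rw [hat, List.map_cons, List.sum_cons]
    have h1 : 1 ≤ pvFactA (a : Int) := hmem a (by rw [hat]; exact List.mem_cons_self)
    have h2 : 0 ≤ ((t.map (fun x : Nat => pvFactA (x : Int))).sum) := by
      apply List.sum_nonneg
      intro x hx
      obtain ⟨y, hy, rfl⟩ := List.mem_map.mp hx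
      have := hmem y (by rw [hat]; exact List.mem_cons_of_mem _ hy)
      omega
    omega
  set S := ((Dg.map (fun x : Nat => pvFactA (x : Int))).sum) with hSdef
  set s := S.toNat with hsdef
  have hSs : S = (s : Int) := by omega
  have hdigs : ∀ x ∈ Nat.digits 10 s, x < 10 :=
    fun x hx => Nat.digits_lt_base (by norm_num) hx
  -- A's side
  have hA : isDigitorialPermutation (m : Int) =
      pvDictEq (PySem.Dict.counter (List.map Int.ofNat (Nat.digits 10 s)))
               (PySem.Dict.counter (List.map Int.ofNat Dg)) := by
    unfold isDigitorialPermutation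
    rw [pvLoop1_spec m ((m : Int).toNat + 1) (by simp) PySem.Dict.empty 0]
    simp only [zero_add]
    rw [counter_of_foldl]
    rw [← hDg, ← hSdef, hSs]
    rw [pvLoop2_spec s ((s : Int).toNat + 1) (by simp) PySem.Dict.empty]
    rw [counter_of_foldl]
  -- B's side
  have hB : isDigitorialPermutation_alt (m : Int) = decide ((Nat.digits 10 s).Perm Dg) := by
    unfold isDigitorialPermutation_alt
    rw [toChars_natCast m hm, pvSigRes_spec Dg hdig]
    simp only [← hSdef, hSs]
    exact pvDivLoop_spec s ((s : Int).toNat + 1) (by simp) Dg hdig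
  rw [hA, hB]
  rw [Bool.eq_iff_iff, decide_eq_true_iff]
  rw [pvDictEq_counter_iff, perm_map_ofNat]

-- ===== VERDICT (by name: the statement is the Claim_ definition above) =====
theorem isDigitorialPermutation_spec : Claim_unchanged_isDigitorialPermutation := by
  intro n _ hpre hD
  unfold Pre_isDigitorialPermutation at hpre
  unfold D_isDigitorialPermutation at hD
  lift n to Nat using hpre with m
  exact main_eq m (by omega)

theorem isDigitorialPermutation_changed : Claim_changed_isDigitorialPermutation := by
  unfold Claim_changed_isDigitorialPermutation; decide

theorem isDigitorialPermutation_tight : Claim_exact_isDigitorialPermutation := by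
  intro n _ _ hD
  unfold D_isDigitorialPermutation at hD
  subst hD
  decide
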